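-- pv_equiv track=rewrite | github.com/hrishi-n/Academics | CSE-531-Analysis-of-Algorithms/StrongInversion/SI.py | ehc_mergeSort
-- ===== SOURCE A (Python) =====
-- def mergeSort_Inv(leftSubArray, rightSubArray):
--     resutList = []
--     numInv = 0
--     i = 0
--     j = 0
--
--     while(i < len(leftSubArray) and j < len(rightSubArray)):
--         if(leftSubArray[i] > 2*rightSubArray[j]):
--             numInv += len(leftSubArray)-i
--             j += 1
--         else:
--             i += 1
--
--     i = 0
--     j = 0
--     while(i < len(leftSubArray) and j < len(rightSubArray)):
--         if(leftSubArray[i] < rightSubArray[j]):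
--             resutList.append(leftSubArray[i])
--             i += 1
--         else:
--             resutList.append(rightSubArray[j])
--             j += 1
--
--     resutList+=leftSubArray[i:]
--
--     resutList+=rightSubArray[j:]
--     return resutList, numInv
--
-- def ehc_mergeSort(numList):
--     if len(numList) > 1:
--
--         mid_index = len(numList) // 2
--
--         leftSubArray, m1 = ehc_mergeSort(numList[:mid_index])
--         rightSubArray, m2 = ehc_mergeSort(numList[mid_index:])
--         resutList, m3 = mergeSort_Inv(leftSubArray, rightSubArray)
--
--         return resutList, (m1+m2+m3)
--
--     else:
--         return numList, 0
-- ===== SOURCE B (Python) =====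
-- def ehc_mergeSort(numList):
--     count = 0
--     rest = list(numList)
--     while rest:
--         x = rest.pop(0)
--         count += sum(1 for y in rest if x > 2 * y)
--     return sorted(numList), count
-- ===== Notes on version B (the rewrite author's own statement) =====
-- stated objective: simpler
-- what changed: Replaced the recursive merge-sort with two-pointer cross counting by a direct pair-count loop over the list plus a library sorted() for the first component.
import Mathlib
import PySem

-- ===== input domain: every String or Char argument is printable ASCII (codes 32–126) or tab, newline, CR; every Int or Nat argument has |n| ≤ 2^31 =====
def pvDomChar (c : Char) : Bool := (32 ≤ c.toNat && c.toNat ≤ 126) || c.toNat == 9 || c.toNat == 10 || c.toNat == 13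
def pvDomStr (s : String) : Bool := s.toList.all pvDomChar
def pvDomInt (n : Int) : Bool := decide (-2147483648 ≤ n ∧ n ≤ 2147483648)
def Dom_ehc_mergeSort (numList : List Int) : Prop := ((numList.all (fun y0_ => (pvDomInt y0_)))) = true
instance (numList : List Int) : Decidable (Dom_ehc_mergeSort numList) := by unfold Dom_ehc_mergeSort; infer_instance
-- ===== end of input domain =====

-- B replaces A's merge-sort divide-and-conquer inversion counting by a direct
-- pair-count loop plus a library sort (objective: simpler; return value only).

-- ===== PORT A =====
-- first while loop of mergeSort_Inv: the strong-inversion counting loop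
-- (numInv accumulated on return instead of in a mutable variable — same sum)
def pvCountLoop (L R : List Int) (i j : Nat) : Int :=
  if h : i < L.length ∧ j < R.length then
    if 2 * R[j] < L[i] then ((L.length - i : Nat) : Int) + pvCountLoop L R i (j + 1)
    else pvCountLoop L R (i + 1) j
  else 0
termination_by (L.length - i) + (R.length - j)
decreasing_by
  · exact Nat.add_lt_add_left (Nat.sub_succ_lt_self _ _ h.2) _
  · exact Nat.add_lt_add_right (Nat.sub_succ_lt_self _ _ h.1) _

-- second while loop of mergeSort_Inv; the two trailing slice appends
-- resutList += leftSubArray[i:]; resutList += rightSubArray[j:] are the base case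
def pvMergeLoop (L R : List Int) (i j : Nat) : List Int :=
  if h : i < L.length ∧ j < R.length then
    if L[i] < R[j] then L[i] :: pvMergeLoop L R (i + 1) j
    else R[j] :: pvMergeLoop L R i (j + 1)
  else L.drop i ++ R.drop j
termination_by (L.length - i) + (R.length - j)
decreasing_by
  · exact Nat.add_lt_add_right (Nat.sub_succ_lt_self _ _ h.1) _
  · exact Nat.add_lt_add_left (Nat.sub_succ_lt_self _ _ h.2) _

def mergeSort_Inv (leftSubArray rightSubArray : List Int) : List Int × Int :=
  (pvMergeLoop leftSubArray rightSubArray 0 0, pvCountLoop leftSubArray rightSubArray 0 0)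

-- numList[:mid] / numList[mid:] with 0 ≤ mid ≤ len are exactly take/drop
def ehc_mergeSort (numList : List Int) : List Int × Int :=
  if numList.length > 1 then
    let mid := numList.length / 2
    let l := ehc_mergeSort (numList.take mid)
    let r := ehc_mergeSort (numList.drop mid)
    let m := mergeSort_Inv l.1 r.1
    (m.1, l.2 + r.2 + m.2)
  else (numList, 0)
termination_by numList.length
decreasing_by
  · rename_i h
    rw [List.length_take]
    exact Nat.lt_of_le_of_lt (Nat.min_le_left _ _)
      (Nat.div_lt_self (Nat.lt_trans Nat.zero_lt_one h) Nat.one_lt_two)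
  · rename_i h
    rw [List.length_drop]
    exact Nat.sub_lt (Nat.lt_trans Nat.zero_lt_one h) (Nat.div_pos h Nat.zero_lt_two)

-- ===== PORT B =====
-- while rest: x = rest.pop(0); count += sum(1 for y in rest if x > 2*y)
def pvSiLoop : List Int → Int → Int
  | [], count => count
  | x :: rest, count =>
      pvSiLoop rest (count + ((rest.countP (fun y => decide (2 * y < x)) : Nat) : Int))

def ehc_mergeSort_alt (numList : List Int) : List Int × Int :=
  (PySem.List.sorted numList (fun x => x) false, pvSiLoop numList 0)

-- ===== PRECONDITION & SPEC =====
def Spec_ehc_mergeSort (numList : List Int) (out : List Int × Int) : Prop := out = ehc_mergeSort_alt numList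
instance (numList : List Int) (out : List Int × Int) : Decidable (Spec_ehc_mergeSort numList out) := by unfold Spec_ehc_mergeSort; infer_instance

-- ===== CLAIM (what is proved, stated in full; the proofs are below) =====
def Claim_equal_ehc_mergeSort : Prop := ∀ (numList : List Int), Dom_ehc_mergeSort numList → Spec_ehc_mergeSort numList (ehc_mergeSort numList)

-- ===== LEMMAS AND PROOFS =====

-- number of pairs (x from A, y from B) with x > 2*y
def pvCross (A B : List Int) : Nat :=
  (A.map (fun x => B.countP (fun y => decide (2 * y < x)))).sum

-- strong inversions of a single list, peeling the head
def pvSI : List Int → Nat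
  | [] => 0
  | x :: t => t.countP (fun y => decide (2 * y < x)) + pvSI t

theorem pvSiLoop_eq (xs : List Int) (c : Int) : pvSiLoop xs c = c + (pvSI xs : Nat) := by
  induction xs generalizing c with
  | nil => simp [pvSiLoop, pvSI]
  | cons x t ih => simp [pvSiLoop, pvSI, ih]; ring

theorem pvCross_nil_right (A : List Int) : pvCross A [] = 0 := by
  induction A with
  | nil => rfl
  | cons a t ih => simp [pvCross] at ih ⊢

theorem pvCross_cons_right (A : List Int) (y : Int) (B : List Int) :
    pvCross A (y :: B) = A.countP (fun x => decide (2 * y < x)) + pvCross A B := by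
  induction A with
  | nil => rfl
  | cons a t ih => simp [pvCross, List.countP_cons] at ih ⊢; omega

theorem pvSI_append (A B : List Int) : pvSI (A ++ B) = pvSI A + pvSI B + pvCross A B := by
  induction A with
  | nil => simp [pvSI, pvCross]
  | cons a t ih => simp [pvSI, pvCross, List.countP_append] at ih ⊢; omega

theorem pvCross_perm_left {A A' : List Int} (h : A.Perm A') (B : List Int) :
    pvCross A B = pvCross A' B := (h.map _).sum_eq

theorem pvCross_perm_right (A : List Int) {B B' : List Int} (h : B.Perm B') :
    pvCross A B = pvCross A B' := by
  unfold pvCross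
  have : (fun x => B.countP (fun y => decide (2 * y < x))) = (fun x => B'.countP (fun y => decide (2 * y < x))) := funext (fun x => h.countP_eq _)
  rw [this]

theorem pairwise_drop_head_le (L : List Int) (hL : L.Pairwise (· ≤ ·)) (i : Nat)
    (h : i < L.length) : ∀ x ∈ L.drop i, L[i] ≤ x := by
  have hd := List.drop_eq_getElem_cons (l := L) h
  have hp : (L.drop i).Pairwise (· ≤ ·) := hL.sublist (List.drop_sublist i L)
  rw [hd] at hp ⊢
  intro x hx
  rcases List.mem_cons.mp hx with rfl | hx
  · exact le_refl _
  · exact (List.pairwise_cons.mp hp).1 x hx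

theorem pvCross_cons_left (x : Int) (A B : List Int) :
    pvCross (x :: A) B = B.countP (fun y => decide (2 * y < x)) + pvCross A B := by
  simp [pvCross]

theorem pvCountLoop_eq (L R : List Int) (hL : L.Pairwise (· ≤ ·)) (hR : R.Pairwise (· ≤ ·))
    (i j : Nat) : pvCountLoop L R i j = ((pvCross (L.drop i) (R.drop j) : Nat) : Int) := by
  fun_induction pvCountLoop L R i j with
  | case1 i j h hgt ih =>
    rw [List.drop_eq_getElem_cons h.2, pvCross_cons_right]
    have hcount : (L.drop i).countP (fun x => decide (2 * R[j] < x)) = (L.drop i).length := by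
      rw [List.countP_eq_length]
      intro x hx
      have hle : L[i] ≤ x := pairwise_drop_head_le L hL i h.1 x hx
      simp only [decide_eq_true_eq]
      omega
    rw [ih, hcount]
    have : (L.drop i).length = L.length - i := List.length_drop
    push_cast
    omega
  | case2 i j h hgt ih =>
    rw [List.drop_eq_getElem_cons h.1, pvCross_cons_left]
    have hz : (R.drop j).countP (fun y => decide (2 * y < L[i])) = 0 := by
      rw [List.countP_eq_zero]
      intro y hy
      have hle : R[j] ≤ y := pairwise_drop_head_le R hR j h.2 y hy
      simp only [decide_eq_true_eq]
      omega
    rw [ih, hz]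
    simp
  | case3 i j h =>
    rcases Nat.lt_or_ge i L.length with hi | hi
    · have hj : R.length ≤ j := by omega
      rw [List.drop_eq_nil_of_le hj, pvCross_nil_right]
      simp
    · rw [List.drop_eq_nil_of_le hi]
      simp [pvCross]

theorem pvMergeLoop_perm (L R : List Int) (i j : Nat) :
    (pvMergeLoop L R i j).Perm (L.drop i ++ R.drop j) := by
  fun_induction pvMergeLoop L R i j with
  | case1 i j h hlt ih =>
    rw [List.drop_eq_getElem_cons h.1]
    exact ih.cons _
  | case2 i j h hlt ih =>
    rw [List.drop_eq_getElem_cons h.2]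
    exact (ih.cons _).trans List.perm_middle.symm
  | case3 i j h => exact List.Perm.refl _

theorem pvMergeLoop_pairwise (L R : List Int) (hL : L.Pairwise (· ≤ ·))
    (hR : R.Pairwise (· ≤ ·)) (i j : Nat) : (pvMergeLoop L R i j).Pairwise (· ≤ ·) := by
  fun_induction pvMergeLoop L R i j with
  | case1 i j h hlt ih =>
    refine List.pairwise_cons.mpr ⟨fun z hz => ?_, ih⟩
    have hz' : z ∈ L.drop (i + 1) ++ R.drop j := (pvMergeLoop_perm L R (i + 1) j).mem_iff.mp hz
    rcases List.mem_append.mp hz' with hz' | hz'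
    · have : z ∈ L.drop i := by
        rw [List.drop_eq_getElem_cons h.1]; exact List.mem_cons_of_mem _ hz'
      exact pairwise_drop_head_le L hL i h.1 z this
    · have := pairwise_drop_head_le R hR j h.2 z hz'
      omega
  | case2 i j h hlt ih =>
    refine List.pairwise_cons.mpr ⟨fun z hz => ?_, ih⟩
    have hz' : z ∈ L.drop i ++ R.drop (j + 1) := (pvMergeLoop_perm L R i (j + 1)).mem_iff.mp hz
    rcases List.mem_append.mp hz' with hz' | hz'
    · have := pairwise_drop_head_le L hL i h.1 z hz'
      omega
    · have : z ∈ R.drop j := by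
        rw [List.drop_eq_getElem_cons h.2]; exact List.mem_cons_of_mem _ hz'
      exact pairwise_drop_head_le R hR j h.2 z this
  | case3 i j h =>
    rcases Nat.lt_or_ge i L.length with hi | hi
    · have hj : R.length ≤ j := by omega
      rw [List.drop_eq_nil_of_le hj, List.append_nil]
      exact hL.sublist (List.drop_sublist i L)
    · rw [List.drop_eq_nil_of_le hi, List.nil_append]
      exact hR.sublist (List.drop_sublist j R)

theorem ehc_main (xs : List Int) :
    ehc_mergeSort xs = (PySem.List.sorted xs (fun x => x) false, ((pvSI xs : Nat) : Int)) := by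
  fun_induction ehc_mergeSort xs with
  | case1 xs h mid l r m ih1 ih2 =>
    have hmid : mid = xs.length / 2 := rfl
    have hl : l = (PySem.List.sorted (xs.take mid) (fun x => x) false,
        ((pvSI (xs.take mid) : Nat) : Int)) := ih1
    have hr : r = (PySem.List.sorted (xs.drop mid) (fun x => x) false,
        ((pvSI (xs.drop mid) : Nat) : Int)) := ih2
    have hpl : l.1.Pairwise (· ≤ ·) := by
      rw [hl]; exact PySem.List.sorted_pairwise _ _
    have hpr : r.1.Pairwise (· ≤ ·) := by
      rw [hr]; exact PySem.List.sorted_pairwise _ _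
    have hperml : l.1.Perm (xs.take mid) := by rw [hl]; exact PySem.List.sorted_perm _ _ _
    have hpermr : r.1.Perm (xs.drop mid) := by rw [hr]; exact PySem.List.sorted_perm _ _ _
    have hm1 : m.1 = pvMergeLoop l.1 r.1 0 0 := rfl
    have hm2 : m.2 = pvCountLoop l.1 r.1 0 0 := rfl
    have hperm : m.1.Perm xs := by
      rw [hm1]
      refine ((pvMergeLoop_perm l.1 r.1 0 0).trans ?_)
      simp only [List.drop_zero]
      have := (hperml.append hpermr).trans (by rw [List.take_append_drop] : ((xs.take mid) ++ (xs.drop mid)).Perm xs)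
      exact this
    have hfst : m.1 = PySem.List.sorted xs (fun x => x) false := by
      exact (PySem.List.sorted_id_eq_of_perm_of_pairwise xs m.1 hperm
        (by rw [hm1]; exact pvMergeLoop_pairwise l.1 r.1 hpl hpr 0 0)).symm
    have hsnd : l.2 + r.2 + m.2 = ((pvSI xs : Nat) : Int) := by
      have hc : m.2 = ((pvCross (xs.take mid) (xs.drop mid) : Nat) : Int) := by
        rw [hm2, pvCountLoop_eq l.1 r.1 hpl hpr 0 0]
        simp only [List.drop_zero]
        rw [pvCross_perm_left hperml, pvCross_perm_right _ hpermr]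
      have hsi : pvSI xs = pvSI (xs.take mid) + pvSI (xs.drop mid)
          + pvCross (xs.take mid) (xs.drop mid) := by
        conv_lhs => rw [← List.take_append_drop mid xs]
        exact pvSI_append _ _
      rw [hl, hr, hc, hsi]
      push_cast
      ring
    exact Prod.ext hfst hsnd
  | case2 xs h =>
    match xs with
    | [] => rfl
    | [a] => simp [PySem.List.sorted_eq_self_of_pairwise, pvSI]
    | a :: b :: t => simp at h

-- ===== VERDICT (by name: the statement is the Claim_ definition above) =====
theorem ehc_mergeSort_spec : Claim_equal_ehc_mergeSort := by
  intro xs _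
  unfold Spec_ehc_mergeSort ehc_mergeSort_alt
  rw [ehc_main, pvSiLoop_eq]
  simp
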